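-- pv_equiv track=rewrite | github.com/AnUnknownStranger/PersonalityAiAgent | harry_logic.py | simple_dialogue_retrieval
-- ===== SOURCE A (Python) =====
-- def simple_dialogue_retrieval(question, dialogues, top_k=10):
--     query_terms = set(question.lower().replace('?', ' ').replace(',', ' ').split())
--     scored = []
--     for line in dialogues:
--         line_terms = set(line.lower().replace('?', ' ').replace(',', ' ').split())
--         overlap = len(query_terms & line_terms)
--         scored.append((overlap, line))
--
--     scored.sort(key=lambda x: x[0], reverse=True)
--     best = [line for score, line in scored if score > 0][:top_k]
--
--     if len(best) < top_k:
--         filler = [line for score, line in scored if score == 0][: max(0, top_k - len(best))]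
--         best.extend(filler)
--
--     return best
-- ===== SOURCE B (Python) =====
-- def simple_dialogue_retrieval(question, dialogues, top_k=10):
--     # Bucket (counting-sort) selection: group lines by overlap score, then take
--     # from the highest bucket down until top_k lines are collected.
--     query_terms = set(question.lower().replace('?', ' ').replace(',', ' ').split())
--     buckets = [[] for _ in range(len(query_terms) + 1)]
--     for line in dialogues:
--         line_terms = set(line.lower().replace('?', ' ').replace(',', ' ').split())
--         buckets[len(query_terms & line_terms)].append(line)
--     out = []
--     for bucket in reversed(buckets):
--         if len(out) >= top_k:
--             break
--         out.extend(bucket)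
--     return out[:top_k]
-- ===== Notes on version B (the rewrite author's own statement) =====
-- stated objective: alternative
-- what changed: B replaces A's build-scored-pairs + stable reverse sort + positive/filler partition by a counting-sort bucket pass: lines are grouped into per-score buckets in one pass and collected from the highest score down until top_k lines are taken.
-- outside the precondition, e.g. on simple_dialogue_retrieval('a b c', ['a', 'b', 'x', 'c'], -1): A returns ['a', 'b'], B returns []
import Mathlib
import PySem

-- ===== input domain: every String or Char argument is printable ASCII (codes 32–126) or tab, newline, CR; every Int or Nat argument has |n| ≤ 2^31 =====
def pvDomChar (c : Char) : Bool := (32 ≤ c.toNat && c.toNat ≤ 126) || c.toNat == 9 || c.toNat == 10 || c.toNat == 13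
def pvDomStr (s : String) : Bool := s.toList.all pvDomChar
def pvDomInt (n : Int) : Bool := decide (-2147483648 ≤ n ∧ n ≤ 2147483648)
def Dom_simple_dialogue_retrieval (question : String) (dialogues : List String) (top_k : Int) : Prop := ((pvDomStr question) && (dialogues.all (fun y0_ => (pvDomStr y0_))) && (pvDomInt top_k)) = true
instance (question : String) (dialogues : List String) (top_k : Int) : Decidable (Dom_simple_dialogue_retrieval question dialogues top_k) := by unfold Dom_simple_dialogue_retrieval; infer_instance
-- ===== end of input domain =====

-- B replaces A's sort + positive/filler partition by a single counting-sort bucket pass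
-- (group lines by overlap score, collect buckets from the highest score down); objective: alternative.


-- ===== PORT A =====
-- shared tokenizer: set(s.lower().replace('?', ' ').replace(',', ' ').split()) — identical text in both Pythons
def sdrTerms (s : String) : PySem.Set String :=
  PySem.Set.ofList (PySem.Str.split₀ (PySem.Str.replace (PySem.Str.replace (PySem.Str.lower s) "?" " ") "," " "))

-- len(query_terms & line_terms) — identical text in both Pythons
def sdrScore (q : PySem.Set String) (line : String) : Nat :=
  (PySem.Set.inter q (sdrTerms line)).length

def simple_dialogue_retrieval (question : String) (dialogues : List String) (top_k : Int) : List String :=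
  let query_terms := sdrTerms question
  let scored := dialogues.foldl (fun acc line => acc ++ [(sdrScore query_terms line, line)]) ([] : List (Nat × String))
  let scored := PySem.List.sorted scored (fun x => x.1) true
  let best := PySem.List.slice ((scored.filter (fun x => decide (0 < x.1))).map (fun x => x.2)) none (some top_k)
  if (best.length : Int) < top_k then
    best ++ PySem.List.slice ((scored.filter (fun x => decide (x.1 = 0))).map (fun x => x.2)) none (some (max 0 (top_k - (best.length : Int))))
  else
    best

-- ===== PORT B =====
-- for bucket in reversed(buckets): if len(out) >= top_k: break; out.extend(bucket)
def sdrCollect (top_k : Int) : List (List String) → List String → List String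
  | [], out => out
  | b :: bs, out => if top_k ≤ (out.length : Int) then out else sdrCollect top_k bs (out ++ b)

def simple_dialogue_retrieval_alt (question : String) (dialogues : List String) (top_k : Int) : List String :=
  let query_terms := sdrTerms question
  let buckets := dialogues.foldl
    (fun bs line => bs.set (sdrScore query_terms line) ((bs.getD (sdrScore query_terms line) []) ++ [line]))
    (List.replicate (query_terms.length + 1) ([] : List String))
  PySem.List.slice (sdrCollect top_k buckets.reverse []) none (some top_k)

-- ===== PRECONDITION & SPEC =====
-- Pre_ excludes negative top_k, a degenerate count on which A's value (all positive-score lines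
-- minus the last |top_k| of them, via Python's negative slicing, and never any filler) is an
-- accident of its slice-based implementation; B naturally returns [] there.
def Pre_simple_dialogue_retrieval (question : String) (dialogues : List String) (top_k : Int) : Prop := 0 ≤ top_k
instance (question : String) (dialogues : List String) (top_k : Int) : Decidable (Pre_simple_dialogue_retrieval question dialogues top_k) := by unfold Pre_simple_dialogue_retrieval; infer_instance

def pvWitness_simple_dialogue_retrieval : String × List String × Int :=
  ("what is your name?", ["my name is harry", "nothing here", "your wand, sir"], 2)

def Spec_simple_dialogue_retrieval (question : String) (dialogues : List String) (top_k : Int) (out : List String) : Prop := out = simple_dialogue_retrieval_alt question dialogues top_k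
instance (question : String) (dialogues : List String) (top_k : Int) (out : List String) : Decidable (Spec_simple_dialogue_retrieval question dialogues top_k out) := by unfold Spec_simple_dialogue_retrieval; infer_instance

-- ===== CLAIM (what is proved, stated in full; the proofs are below) =====
def Claim_equal_simple_dialogue_retrieval : Prop := ∀ (question : String) (dialogues : List String) (top_k : Int), Dom_simple_dialogue_retrieval question dialogues top_k → Pre_simple_dialogue_retrieval question dialogues top_k → Spec_simple_dialogue_retrieval question dialogues top_k (simple_dialogue_retrieval question dialogues top_k)

-- ===== LEMMAS AND PROOFS =====

-- scores are bounded by the query-set size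
theorem sdrScore_lt (q : PySem.Set String) (line : String) : sdrScore q line < q.length + 1 := by
  have : (PySem.Set.inter q (sdrTerms line)).length ≤ q.length := List.length_filter_le _ q
  simpa [sdrScore] using Nat.lt_succ_of_le this

-- insertBy (descending before-relation) preserves the descending-pairwise invariant
theorem sdr_insertBy_pairwise {α : Type} (key : α → Nat) (x : α) (acc : List α)
    (h : acc.Pairwise (fun a b => key b ≤ key a)) :
    (PySem.List.insertBy (fun a b => decide (key b < key a)) x acc).Pairwise (fun a b => key b ≤ key a) := by
  induction acc with
  | nil => simp [PySem.List.insertBy]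
  | cons y ys ih =>
    rcases List.pairwise_cons.mp h with ⟨hy, hys⟩
    by_cases hlt : key y < key x
    · simp only [PySem.List.insertBy, hlt, decide_true, if_pos rfl]
      refine List.pairwise_cons.mpr ⟨?_, h⟩
      intro z hz
      rcases List.mem_cons.mp hz with rfl | hz
      · exact le_of_lt hlt
      · exact le_trans (hy z hz) (le_of_lt hlt)
    · have : (decide (key y < key x)) = false := by simpa using hlt
      simp only [PySem.List.insertBy, this, Bool.false_eq_true, if_false]
      refine List.pairwise_cons.mpr ⟨?_, ih hys⟩
      intro z hz
      rcases (PySem.List.mem_insertBy _ x z ys).mp hz with rfl | hz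
      · omega
      · exact hy z hz

-- stable insertion: filtering at an exact key value appends the new element at the back
theorem sdr_insertBy_filter {α : Type} (key : α → Nat) (v : Nat) (x : α) (acc : List α)
    (h : acc.Pairwise (fun a b => key b ≤ key a)) :
    (PySem.List.insertBy (fun a b => decide (key b < key a)) x acc).filter (fun y => decide (key y = v)) =
      if key x = v then acc.filter (fun y => decide (key y = v)) ++ [x]
      else acc.filter (fun y => decide (key y = v)) := by
  induction acc with
  | nil => by_cases hv : key x = v <;> simp [PySem.List.insertBy, hv]
  | cons y ys ih =>
    rcases List.pairwise_cons.mp h with ⟨hy, hys⟩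
    by_cases hlt : key y < key x
    · simp only [PySem.List.insertBy, hlt, decide_true, if_pos rfl]
      by_cases hv : key x = v
      · have hnil : (y :: ys).filter (fun y => decide (key y = v)) = [] := by
          apply List.filter_eq_nil_iff.mpr
          intro z hz
          have : key z ≤ key y := by
            rcases List.mem_cons.mp hz with rfl | hz
            · exact le_refl _
            · exact hy z hz
          simp; omega
        simp [hv, hnil]
      · simp [List.filter_cons, hv]
    · have hdec : (decide (key y < key x)) = false := by simpa using hlt
      simp only [PySem.List.insertBy, hdec, Bool.false_eq_true, if_false]
      by_cases hyv : key y = v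
      · by_cases hv : key x = v <;> simp [List.filter_cons, hyv, hv, ih hys]
      · by_cases hv : key x = v <;> simp [List.filter_cons, hyv, hv, ih hys]

-- stability of Python's sort: filtering the sorted list at one key value = filtering the input
theorem sdr_sorted_filter {α : Type} (key : α → Nat) (v : Nat) (xs : List α) :
    (PySem.List.sorted xs key true).filter (fun y => decide (key y = v)) =
      xs.filter (fun y => decide (key y = v)) := by
  rw [PySem.List.sorted_rev_eq_foldl_insertBy]
  suffices h : ∀ (acc : List α), acc.Pairwise (fun a b => key b ≤ key a) →
      (xs.foldl (fun acc x => PySem.List.insertBy (fun a b => decide (key b < key a)) x acc) acc).filter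
        (fun y => decide (key y = v)) =
      acc.filter (fun y => decide (key y = v)) ++ xs.filter (fun y => decide (key y = v)) by
    simpa using h [] (by simp)
  induction xs with
  | nil => intro acc _; simp
  | cons x xs ih =>
    intro acc hacc
    simp only [List.foldl_cons]
    rw [ih _ (sdr_insertBy_pairwise key x acc hacc), sdr_insertBy_filter key v x acc hacc]
    by_cases hv : key x = v <;> simp [List.filter_cons, hv]

-- a descending list whose keys are ≤ m splits as (filter = m) ++ (filter < m)
theorem sdr_split_top {α : Type} (key : α → Nat) (m : Nat) (ys : List α)
    (hp : ys.Pairwise (fun a b => key b ≤ key a)) (hb : ∀ y ∈ ys, key y ≤ m) :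
    ys.filter (fun y => decide (key y = m)) ++ ys.filter (fun y => decide (key y < m)) = ys := by
  induction ys with
  | nil => simp
  | cons a t ih =>
    rcases List.pairwise_cons.mp hp with ⟨ha, ht⟩
    by_cases hm : key a = m
    · have : t.filter (fun y => decide (key y = m)) ++ t.filter (fun y => decide (key y < m)) = t :=
        ih ht (fun y hy => hb y (List.mem_cons_of_mem a hy))
      simp [List.filter_cons, hm, this]
    · have halt : key a < m := lt_of_le_of_ne (hb a (List.mem_cons_self)) hm
      have h1 : (a :: t).filter (fun y => decide (key y = m)) = [] := by
        apply List.filter_eq_nil_iff.mpr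
        intro z hz
        have : key z ≤ key a := by
          rcases List.mem_cons.mp hz with rfl | hz
          · exact le_refl _
          · exact ha z hz
        simp; omega
      have h2 : (a :: t).filter (fun y => decide (key y < m)) = a :: t := by
        apply List.filter_eq_self.mpr
        intro z hz
        have : key z ≤ key a := by
          rcases List.mem_cons.mp hz with rfl | hz
          · exact le_refl _
          · exact ha z hz
        simp; omega
      simp [h1, h2]

-- a descending list splits as positives ++ zeros
theorem sdr_split_pos {α : Type} (key : α → Nat) (ys : List α)
    (hp : ys.Pairwise (fun a b => key b ≤ key a)) :
    ys.filter (fun y => decide (0 < key y)) ++ ys.filter (fun y => decide (key y = 0)) = ys := by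
  induction ys with
  | nil => simp
  | cons a t ih =>
    rcases List.pairwise_cons.mp hp with ⟨ha, ht⟩
    by_cases h0 : key a = 0
    · have h1 : (a :: t).filter (fun y => decide (0 < key y)) = [] := by
        apply List.filter_eq_nil_iff.mpr
        intro z hz
        have : key z ≤ key a := by
          rcases List.mem_cons.mp hz with rfl | hz
          · exact le_refl _
          · exact ha z hz
        simp; omega
      have h2 : (a :: t).filter (fun y => decide (key y = 0)) = a :: t := by
        apply List.filter_eq_self.mpr
        intro z hz
        have : key z ≤ key a := by
          rcases List.mem_cons.mp hz with rfl | hz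
          · exact le_refl _
          · exact ha z hz
        simp; omega
      simp [h1, h2]
    · simp [List.filter_cons, h0, Nat.pos_of_ne_zero h0, ih ht]

-- a descending list with keys < n is the concatenation of its exact-key filters, top score first
theorem sdr_decomp {α : Type} (key : α → Nat) (n : Nat) (ys : List α)
    (hp : ys.Pairwise (fun a b => key b ≤ key a)) (hb : ∀ y ∈ ys, key y < n) :
    ((List.range n).reverse).flatMap (fun v => ys.filter (fun y => decide (key y = v))) = ys := by
  induction n generalizing ys with
  | zero =>
    have : ys = [] := by
      cases ys with
      | nil => rfl
      | cons a t => exact absurd (hb a (List.mem_cons_self)) (by omega)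
    simp [this]
  | succ n ih =>
    rw [List.range_succ, List.reverse_append]
    simp only [List.reverse_singleton, List.singleton_append, List.flatMap_cons]
    set R := ys.filter (fun y => decide (key y < n)) with hR
    have hsplit : ys.filter (fun y => decide (key y = n)) ++ R = ys :=
      sdr_split_top key n ys hp (fun y hy => Nat.lt_succ_iff.mp (hb y hy))
    have hcong : ((List.range n).reverse).flatMap (fun v => ys.filter (fun y => decide (key y = v))) =
        ((List.range n).reverse).flatMap (fun v => R.filter (fun y => decide (key y = v))) := by
      apply List.flatMap_congr  -- may not exist; fallback below
      intro v hv
      have hv' : v < n := by simpa using List.mem_reverse.mp hv |> List.mem_range.mp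
      rw [hR, List.filter_filter]
      apply List.filter_congr
      intro y _
      by_cases h : key y = v <;> simp [h] <;> omega
    rw [hcong, ih R (List.Pairwise.filter _ hp) (fun y hy => by
      have := List.of_mem_filter hy; simpa using this)]
    exact hsplit

-- A's slice / filler arithmetic is take-of-append
theorem sdr_take_split (P Z : List String) (k : Int) (hk : 0 ≤ k) :
    (if ((PySem.List.slice P none (some k)).length : Int) < k
     then PySem.List.slice P none (some k) ++
          PySem.List.slice Z none (some (max 0 (k - ((PySem.List.slice P none (some k)).length : Int))))
     else PySem.List.slice P none (some k)) = (P ++ Z).take k.toNat := by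
  rw [PySem.List.slice_to P hk, PySem.List.slice_to Z (le_max_left 0 _)]
  rw [List.take_append]
  by_cases hc : ((P.take k.toNat).length : Int) < k
  · rw [if_pos hc]
    have hlen : (P.take k.toNat).length = min k.toNat P.length := by simp
    have hPlt : P.length < k.toNat := by omega
    have h1 : P.take k.toNat = P := List.take_of_length_le (le_of_lt hPlt)
    have h2 : (max 0 (k - ((P.take k.toNat).length : Int))).toNat = k.toNat - P.length := by
      rw [h1]; omega
    rw [h2, h1]
  · rw [if_neg hc]
    have hlen : (P.take k.toNat).length = min k.toNat P.length := by simp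
    have hk2 : k.toNat ≤ P.length := by omega
    have : k.toNat - P.length = 0 := by omega
    rw [this]
    simp

-- identity fold over the buckets list
theorem sdr_getD_range_map {β : Type} (bs : List β) (d : β) :
    (List.range bs.length).map (fun v => bs.getD v d) = bs := by
  apply List.ext_getElem
  · simp
  · intro i h1 h2
    simp [List.getD_eq_getElem?_getD, List.getElem?_eq_getElem h2]

-- the bucket fold groups the lines by score, keeping their order
theorem sdr_buckets (q : PySem.Set String) (ds : List String) :
    ∀ (bs : List (List String)), (∀ l ∈ ds, sdrScore q l < bs.length) →
    ds.foldl (fun bs line => bs.set (sdrScore q line) ((bs.getD (sdrScore q line) []) ++ [line])) bs =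
      (List.range bs.length).map (fun v => bs.getD v [] ++ ds.filter (fun l => decide (sdrScore q l = v))) := by
  induction ds with
  | nil => intro bs _; simpa using (sdr_getD_range_map bs []).symm
  | cons line t ih =>
    intro bs hb
    have hs : sdrScore q line < bs.length := hb line (List.mem_cons_self)
    simp only [List.foldl_cons]
    rw [ih _ (by
      intro l hl
      rw [List.length_set]
      exact hb l (List.mem_cons_of_mem line hl))]
    rw [List.length_set]
    apply List.map_congr_left
    intro v hv
    have hv' : v < bs.length := List.mem_range.mp hv
    have hget : (bs.set (sdrScore q line) ((bs.getD (sdrScore q line) []) ++ [line])).getD v [] =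
        if sdrScore q line = v then bs.getD v [] ++ [line] else bs.getD v [] := by
      rw [List.getD_eq_getElem _ [] (by simpa using hv'), List.getElem_set]
      by_cases h : sdrScore q line = v
      · subst h; simp [List.getD_eq_getElem?_getD, List.getElem?_eq_getElem hv']
      · simp [h, List.getD_eq_getElem?_getD, List.getElem?_eq_getElem hv']
    rw [hget, List.filter_cons]
    by_cases h : sdrScore q line = v
    · simp [h]
    · simp [h]

-- truncation sees through the early break in the collection loop
theorem sdr_collect_take (k : Int) (hk : 0 ≤ k) :
    ∀ (bs : List (List String)) (out : List String),
    (sdrCollect k bs out).take k.toNat = (out ++ bs.flatten).take k.toNat := by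
  intro bs
  induction bs with
  | nil => intro out; simp [sdrCollect]
  | cons b t ih =>
    intro out
    rw [sdrCollect]
    by_cases h : k ≤ (out.length : Int)
    · rw [if_pos h]
      rw [List.take_append]
      have : k.toNat - out.length = 0 := by omega
      rw [this]
      have : k.toNat ≤ out.length := by omega
      simp [List.take_of_length_le, this]
    · rw [if_neg h, ih (out ++ b)]
      simp [List.append_assoc]

-- stability + projection: filtering A's sorted pair list at score v gives the lines of score v
theorem sdr_filter_sorted_map (q : PySem.Set String) (dialogues : List String) (v : Nat) :
    ((PySem.List.sorted (dialogues.map (fun line => (sdrScore q line, line))) (fun x => x.1) true).filter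
       (fun y => decide (y.1 = v))).map (fun x => x.2) =
      dialogues.filter (fun l => decide (sdrScore q l = v)) := by
  rw [sdr_sorted_filter (α := Nat × String) (fun x => x.1) v, List.filter_map, List.map_map]
  simp only [Function.comp_def]
  simp

set_option maxHeartbeats 1000000 in
-- both sides equal take top_k of the score-grouped concatenation
theorem sdr_main (question : String) (dialogues : List String) (top_k : Int) (hk : 0 ≤ top_k) :
    simple_dialogue_retrieval question dialogues top_k =
      simple_dialogue_retrieval_alt question dialogues top_k := by
  have hL := PySem.List.sorted_pairwise_rev (κ := Nat)
    (dialogues.map (fun line => (sdrScore (sdrTerms question) line, line))) (fun x => x.1)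
  -- A-side
  have hA : simple_dialogue_retrieval question dialogues top_k =
      ((PySem.List.sorted (dialogues.map (fun line => (sdrScore (sdrTerms question) line, line)))
        (fun x => x.1) true).map (fun x => x.2)).take top_k.toNat := by
    simp only [simple_dialogue_retrieval]
    rw [PySem.List.foldl_append_singleton_eq_map, List.nil_append]
    rw [sdr_take_split _ _ _ hk, ← List.map_append]
    rw [sdr_split_pos (α := Nat × String) (fun x => x.1) _ hL]
  have hbound : ∀ y ∈ PySem.List.sorted (dialogues.map (fun line => (sdrScore (sdrTerms question) line, line)))
      (fun x => x.1) true, y.1 < (sdrTerms question).length + 1 := by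
    intro y hy
    have h2 := (PySem.List.mem_sorted _ _ _ _).mp hy
    rcases List.mem_map.mp h2 with ⟨l, -, h⟩
    have h1 : y.1 = sdrScore (sdrTerms question) l := by rw [← h]
    rw [h1]
    exact sdrScore_lt (sdrTerms question) l
  have hdec := sdr_decomp (α := Nat × String) (fun x => x.1) ((sdrTerms question).length + 1)
    (PySem.List.sorted (dialogues.map (fun line => (sdrScore (sdrTerms question) line, line)))
      (fun x => x.1) true) hL hbound
  have hAflat : simple_dialogue_retrieval question dialogues top_k =
      (((List.range ((sdrTerms question).length + 1)).reverse).flatMap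
        (fun v => dialogues.filter (fun l => decide (sdrScore (sdrTerms question) l = v)))).take top_k.toNat := by
    rw [hA, ← hdec, List.map_flatMap]
    apply congrArg (List.take top_k.toNat)
    apply List.flatMap_congr
    intro v _
    exact sdr_filter_sorted_map (sdrTerms question) dialogues v
  -- B-side
  have hrepl : ∀ v, (List.replicate ((sdrTerms question).length + 1) ([] : List String)).getD v [] = [] := by
    intro v
    by_cases h : v < (sdrTerms question).length + 1
    · rw [List.getD_eq_getElem _ [] (by simpa using h)]; simp
    · rw [List.getD_eq_default _ [] (by simpa using h)]
  have hB : simple_dialogue_retrieval_alt question dialogues top_k =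
      (((List.range ((sdrTerms question).length + 1)).reverse).flatMap
        (fun v => dialogues.filter (fun l => decide (sdrScore (sdrTerms question) l = v)))).take top_k.toNat := by
    simp only [simple_dialogue_retrieval_alt]
    rw [PySem.List.slice_to _ hk]
    rw [sdr_buckets (sdrTerms question) dialogues (List.replicate ((sdrTerms question).length + 1) []) (by
      intro l _
      rw [List.length_replicate]
      exact sdrScore_lt (sdrTerms question) l)]
    rw [List.length_replicate]
    have hmc : (List.range ((sdrTerms question).length + 1)).map
        (fun v => (List.replicate ((sdrTerms question).length + 1) ([] : List String)).getD v [] ++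
          dialogues.filter (fun l => decide (sdrScore (sdrTerms question) l = v))) =
        (List.range ((sdrTerms question).length + 1)).map
        (fun v => dialogues.filter (fun l => decide (sdrScore (sdrTerms question) l = v))) := by
      apply List.map_congr_left
      intro v _
      rw [hrepl v, List.nil_append]
    rw [hmc, sdr_collect_take top_k hk]
    rw [List.nil_append, ← List.map_reverse, ← List.flatMap_def]
  rw [hAflat, hB]

-- ===== VERDICT (by name: the statement is the Claim_ definition above) =====
theorem simple_dialogue_retrieval_spec : Claim_equal_simple_dialogue_retrieval := by
  intro question dialogues top_k _ hpre
  unfold Spec_simple_dialogue_retrieval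
  exact sdr_main question dialogues top_k hpre
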